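-- pv_equiv track=rewrite | github.com/ArchipelagoMW/Archipelago | worlds/ff4fe/FreeEnterpriseForAP/FreeEnt/f4c/compile_ai_script.py | partition_commands
-- ===== SOURCE A (Python) =====
-- def partition_commands(children, separator_byte=None):
--     sections = [ [] ]
--
--     for c in children:
--         sections[-1].extend(c)
--         if c[0] == 0xFE or c[0] == 0xFB and len(sections) > 1:
--             sections[-2].extend(sections[-1])
--             sections.pop()
--         elif c[0] <= 0xE7 or c[0] == 0xFD:
--             sections.append([])
--
--     if len(sections) > 1:
--         sections[-2].extend(sections[-1])
--         sections.pop()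
--
--     result = []
--     for i,section in enumerate(sections):
--         if separator_byte is not None and i > 0:
--             result.append(separator_byte)
--         result.extend(section)
--
--     return result
-- ===== SOURCE B (Python) =====
-- def partition_commands(children, separator_byte=None):
--     # Flat byte list + stack of section start offsets instead of nested section lists.
--     out = []
--     starts = [0]
--     for c in children:
--         out.extend(c)
--         head = c[0]
--         if head == 0xFE or (head == 0xFB and len(starts) > 1):
--             starts.pop()
--         elif head <= 0xE7 or head == 0xFD:
--             starts.append(len(out))
--     if len(starts) > 1:
--         starts.pop()
--     if separator_byte is None or len(starts) <= 1:
--         return out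
--     result = []
--     prev = 0
--     for b in starts[1:]:
--         result.extend(out[prev:b])
--         result.append(separator_byte)
--         prev = b
--     result.extend(out[prev:])
--     return result
-- ===== Notes on version B (the rewrite author's own statement) =====
-- stated objective: alternative
-- what changed: B keeps a single flat byte list plus a stack of integer start-offsets instead of A's list of nested section lists that are repeatedly merged by copying; separators are inserted at the end by slicing the flat list at the recorded boundaries.
import Mathlib
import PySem

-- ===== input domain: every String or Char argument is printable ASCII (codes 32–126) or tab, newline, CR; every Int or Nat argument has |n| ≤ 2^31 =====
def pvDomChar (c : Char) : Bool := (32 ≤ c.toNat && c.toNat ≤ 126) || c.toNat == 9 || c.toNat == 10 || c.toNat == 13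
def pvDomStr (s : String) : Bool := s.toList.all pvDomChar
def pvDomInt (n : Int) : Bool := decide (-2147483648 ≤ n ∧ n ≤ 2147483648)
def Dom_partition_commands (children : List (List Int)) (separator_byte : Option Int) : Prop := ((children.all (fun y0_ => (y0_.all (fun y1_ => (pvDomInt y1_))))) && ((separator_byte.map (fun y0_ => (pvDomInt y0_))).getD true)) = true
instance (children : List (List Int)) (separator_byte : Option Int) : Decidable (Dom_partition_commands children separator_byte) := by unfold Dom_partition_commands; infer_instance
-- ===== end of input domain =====

-- B replaces A's list of nested section lists (merged by copying on each close) by one flat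
-- byte list plus a stack of integer section-start offsets, rebuilding with separators at the end.

-- ===== PORT A =====
-- one step of A's `for c in children` loop; `sections` is kept reversed (head = sections[-1])
def pA_step (secs : List (List Int)) (c : List Int) : List (List Int) :=
  match secs with
  | [] => []  -- unreachable: sections is never empty
  | s :: rest =>
    let s' := s ++ c                       -- sections[-1].extend(c)
    let h := c.head?.getD 0                     -- c[0]; Pre_ guarantees c ≠ []
    if h = 0xFE ∨ (h = 0xFB ∧ rest ≠ []) then
      match rest with
      | s2 :: rest' => (s2 ++ s') :: rest' -- sections[-2].extend(sections[-1]); sections.pop()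
      | [] => [s']                         -- Python raises IndexError here; excluded by Pre_
    else if h ≤ 0xE7 ∨ h = 0xFD then [] :: s' :: rest   -- sections.append([])
    else s' :: rest

-- result = []; for i, section in enumerate(sections): …
def pA_emit (separator_byte : Option Int) (sections : List (List Int)) : List Int :=
  sections.zipIdx.foldl
    (fun res p =>
      (if separator_byte.isSome ∧ p.2 > 0 then res ++ [separator_byte.getD 0] else res) ++ p.1)
    []

def partition_commands (children : List (List Int)) (separator_byte : Option Int) : List Int :=
  let secs := children.foldl pA_step [[]]
  let secs :=                                         -- if len(sections) > 1: merge last two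
    match secs with
    | s :: s2 :: rest => (s2 ++ s) :: rest
    | _ => secs
  pA_emit separator_byte secs.reverse

-- ===== PORT B =====
-- one step of B's loop; state = (out, starts) with `starts` kept reversed (head = top of stack)
def pB_step (st : List Int × List Nat) (c : List Int) : List Int × List Nat :=
  let out := st.1 ++ c                     -- out.extend(c)
  let h := c.head?.getD 0                       -- c[0]; Pre_ guarantees c ≠ []
  if h = 0xFE ∨ (h = 0xFB ∧ st.2.length > 1) then (out, st.2.tail)      -- starts.pop()
  else if h ≤ 0xE7 ∨ h = 0xFD then (out, out.length :: st.2)            -- starts.append(len(out))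
  else (out, st.2)

-- result = []; prev = 0; for b in starts[1:]: …; result.extend(out[prev:])
def pB_emit (out : List Int) (bounds : List Nat) (sb : Int) : List Int :=
  let st := bounds.foldl
    (fun (acc : List Int × Nat) b => (acc.1 ++ (out.take b).drop acc.2 ++ [sb], b)) ([], 0)
  st.1 ++ out.drop st.2

def partition_commands_alt (children : List (List Int)) (separator_byte : Option Int) : List Int :=
  let st := children.foldl pB_step ([], [0])
  let out := st.1
  let starts := if st.2.length > 1 then st.2.tail else st.2   -- if len(starts) > 1: starts.pop()
  match separator_byte with
  | none => out
  | some sb =>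
    if starts.length ≤ 1 then out
    else pB_emit out (starts.reverse.drop 1) sb               -- starts[1:] in bottom-to-top order

-- ===== PRECONDITION & SPEC =====
-- nesting-depth well-formedness of the children's first bytes: 1 < d whenever a 0xFE appears
def okHeads : Nat → List Int → Bool
  | _, [] => true
  | d, h :: t =>
    if h = 0xFE then decide (1 < d) && okHeads (d - 1) t
    else if h = 0xFB ∧ 1 < d then okHeads (d - 1) t
    else if h ≤ 0xE7 ∨ h = 0xFD then okHeads (d + 1) t
    else okHeads d t

-- Pre_ excludes exactly the inputs where Python A raises IndexError: an empty child (c[0]),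
-- or a 0xFE close command arriving at nesting depth 1 (sections[-2] on a 1-element list).
def Pre_partition_commands (children : List (List Int)) (separator_byte : Option Int) : Prop :=
  (∀ c ∈ children, c ≠ []) ∧ okHeads 1 (children.map (fun c => c.head?.getD 0)) = true

instance (children : List (List Int)) (separator_byte : Option Int) : Decidable (Pre_partition_commands children separator_byte) := by unfold Pre_partition_commands; infer_instance

def pvWitness_partition_commands : List (List Int) × Option Int :=
  ([[0x10, 1, 2], [0xFF, 3], [0xFE]], some 0xEF)

def Spec_partition_commands (children : List (List Int)) (separator_byte : Option Int) (out : List Int) : Prop := out = partition_commands_alt children separator_byte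
instance (children : List (List Int)) (separator_byte : Option Int) (out : List Int) : Decidable (Spec_partition_commands children separator_byte out) := by unfold Spec_partition_commands; infer_instance

-- ===== CLAIM (what is proved, stated in full; the proofs are below) =====
def Claim_equal_partition_commands : Prop := ∀ (children : List (List Int)) (separator_byte : Option Int), Dom_partition_commands children separator_byte → Pre_partition_commands children separator_byte → Spec_partition_commands children separator_byte (partition_commands children separator_byte)

-- ===== LEMMAS AND PROOFS =====

-- start offsets of A's (reversed) sections: for each section, total length of the sections below it
def offs : List (List Int) → List Nat
  | [] => []
  | _ :: rest => rest.reverse.flatten.length :: offs rest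

lemma offs_length (secs : List (List Int)) : (offs secs).length = secs.length := by
  induction secs with
  | nil => rfl
  | cons s rest ih => simp [offs, ih]

-- one loop step preserves the A↔B state correspondence
lemma step_inv (s c : List Int) (rest : List (List Int)) (hc : c ≠ [])
    (hok : c.head?.getD 0 = 0xFE → rest ≠ []) :
    pB_step ((s :: rest).reverse.flatten, offs (s :: rest)) c
      = ((pA_step (s :: rest) c).reverse.flatten, offs (pA_step (s :: rest) c)) := by
  simp only [pA_step, pB_step]
  generalize hh : c.head?.getD 0 = h at *
  rcases rest with _ | ⟨s2, rest'⟩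
  · have hFE : h ≠ 0xFE := fun he => (hok he) rfl
    by_cases hOp : h ≤ 0xE7 ∨ h = 0xFD
    · simp [hFE, hOp, offs, List.append_assoc]
    · simp [hFE, hOp, offs]
  · by_cases hFE : h = 0xFE
    · simp [hFE, offs, List.append_assoc]
    · by_cases hFB : h = 0xFB
      · simp [hFE, hFB, offs, List.append_assoc]
      · by_cases hOp : h ≤ 0xE7 ∨ h = 0xFD
        · simp [hFE, hFB, hOp, offs, List.append_assoc]
        · simp [hFE, hFB, hOp, offs, List.append_assoc]

lemma pA_step_ne_nil (secs : List (List Int)) (c : List Int) (h : secs ≠ []) :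
    pA_step secs c ≠ [] := by
  rcases secs with _ | ⟨s, rest⟩
  · exact absurd rfl h
  · simp only [pA_step]
    split_ifs <;> rcases rest with _ | ⟨s2, rest'⟩ <;> simp

-- the head-byte well-formedness condition steps along with A's loop
lemma okHeads_step (s c : List Int) (rest t0 : List (List Int))
    (hok : okHeads (s :: rest).length ((c :: t0).map (fun c => c.head?.getD 0)) = true) :
    (c.head?.getD 0 = 0xFE → rest ≠ []) ∧
    okHeads (pA_step (s :: rest) c).length (t0.map (fun c => c.head?.getD 0)) = true := by
  by_cases hFE : c.head?.getD 0 = 0xFE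
  · simp only [List.map_cons, okHeads, hFE, if_true, Bool.and_eq_true, decide_eq_true_eq,
      List.length_cons] at hok
    obtain ⟨h1, h2⟩ := hok
    rcases rest with _ | ⟨s2, rest'⟩
    · simp at h1
    · refine ⟨fun _ => by simp, ?_⟩
      have : pA_step (s :: s2 :: rest') c = (s2 ++ (s ++ c)) :: rest' := by
        simp [pA_step, hFE]
      rw [this]
      simpa using h2
  · by_cases hFB : c.head?.getD 0 = 0xFB
    · have hOp : ¬ (c.head?.getD 0 ≤ 0xE7 ∨ c.head?.getD 0 = 0xFD) := by rw [hFB]; decide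
      rcases rest with _ | ⟨s2, rest'⟩
      · refine ⟨fun he => absurd he hFE, ?_⟩
        have hst : pA_step [s] c = [s ++ c] := by
          simp [pA_step, hFE, hFB, hOp]
        rw [hst]
        simp only [List.map_cons, okHeads, if_neg hFE] at hok
        have hd : ¬ (c.head?.getD 0 = 0xFB ∧ 1 < ([s] : List (List Int)).length) := by simp
        rw [if_neg hd, if_neg hOp] at hok
        simpa using hok
      · refine ⟨fun he => absurd he hFE, ?_⟩
        have hst : pA_step (s :: s2 :: rest') c = (s2 ++ (s ++ c)) :: rest' := by
          simp [pA_step, hFE, hFB]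
        rw [hst]
        simp only [List.map_cons, okHeads, if_neg hFE] at hok
        have hd : c.head?.getD 0 = 0xFB ∧ 1 < (s :: s2 :: rest' : List (List Int)).length :=
          ⟨hFB, by simp⟩
        rw [if_pos hd] at hok
        simpa using hok
    · have hcl : ¬ (c.head?.getD 0 = 0xFE ∨ (c.head?.getD 0 = 0xFB ∧ rest ≠ [])) := by
        rintro (h | h) <;> [exact hFE h; exact hFB h.1]
      have hd : ¬ (c.head?.getD 0 = 0xFB ∧ 1 < (s :: rest : List (List Int)).length) :=
        fun h => hFB h.1
      refine ⟨fun he => absurd he hFE, ?_⟩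
      simp only [List.map_cons, okHeads, if_neg hFE] at hok
      rw [if_neg hd] at hok
      by_cases hOp : c.head?.getD 0 ≤ 0xE7 ∨ c.head?.getD 0 = 0xFD
      · have hst : pA_step (s :: rest) c = [] :: (s ++ c) :: rest := by
          simp [pA_step, hcl, hOp]
        rw [hst, if_pos hOp] at *
        simpa using hok
      · have hst : pA_step (s :: rest) c = (s ++ c) :: rest := by
          simp [pA_step, hcl, hOp]
        rw [hst, if_neg hOp] at *
        simpa using hok

-- the whole loop preserves the correspondence
lemma loop_inv (children : List (List Int)) :
    ∀ (secs : List (List Int)), secs ≠ [] →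
    (∀ c ∈ children, c ≠ []) →
    okHeads secs.length (children.map (fun c => c.head?.getD 0)) = true →
    children.foldl pA_step secs ≠ [] ∧
    children.foldl pB_step (secs.reverse.flatten, offs secs)
      = ((children.foldl pA_step secs).reverse.flatten, offs (children.foldl pA_step secs)) := by
  induction children with
  | nil => exact fun secs hne _ _ => ⟨hne, rfl⟩
  | cons c t0 ih =>
    intro secs hne hall hok
    rcases secs with _ | ⟨s, rest⟩
    · exact absurd rfl hne
    · have hc : c ≠ [] := hall c (List.mem_cons_self ..)
      obtain ⟨h254, hok'⟩ := okHeads_step s c rest t0 hok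
      have hall' : ∀ x ∈ t0, x ≠ [] := fun x hx => hall x (List.mem_cons_of_mem _ hx)
      simp only [List.foldl_cons]
      rw [step_inv s c rest hc h254]
      exact ih (pA_step (s :: rest) c) (pA_step_ne_nil _ _ (by simp)) hall' hok' 

-- A's emit with no separator is a flatten
lemma emitA_none_aux (ss : List (List Int)) : ∀ (i : Nat) (acc : List Int),
    (ss.zipIdx i).foldl
      (fun res p =>
        (if (none : Option Int).isSome ∧ p.2 > 0 then res ++ [(none : Option Int).getD 0] else res) ++ p.1)
      acc = acc ++ ss.flatten := by
  induction ss with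
  | nil => simp
  | cons u us ih => intro i acc; simp [List.zipIdx_cons]

lemma emitA_none (sections : List (List Int)) : pA_emit none sections = sections.flatten := by
  simpa [pA_emit] using emitA_none_aux sections 0 []

-- A's emit with a separator
lemma emitA_some (sb : Int) (t : List Int) (ts : List (List Int)) :
    pA_emit (some sb) (t :: ts) = t ++ ts.flatMap (fun u => sb :: u) := by
  have aux : ∀ (us : List (List Int)) (i : Nat) (acc : List Int), 1 ≤ i →
      (us.zipIdx i).foldl
        (fun res p =>
          (if (some sb).isSome ∧ p.2 > 0 then res ++ [(some sb).getD 0] else res) ++ p.1)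
        acc = acc ++ us.flatMap (fun u => sb :: u) := by
    intro us
    induction us with
    | nil => simp
    | cons u us ih =>
      intro i acc hi
      have hi' : 0 < i := hi
      simp only [List.zipIdx_cons, List.foldl_cons, List.flatMap_cons]
      rw [if_pos ⟨rfl, hi'⟩, ih (i + 1) _ (by omega)]
      simp
  simp only [pA_emit, List.zipIdx_cons, List.foldl_cons]
  rw [if_neg (by simp), aux ts 1 _ le_rfl]
  simp

-- boundary offsets in bottom-to-top order
def cumFrom : Nat → List (List Int) → List Nat
  | _, [] => []
  | n, t :: ts => n :: cumFrom (n + t.length) ts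

lemma cumFrom_append_single (xs : List (List Int)) (s : List Int) :
    ∀ n, cumFrom n (xs ++ [s]) = cumFrom n xs ++ [n + xs.flatten.length] := by
  induction xs with
  | nil => simp [cumFrom]
  | cons x xs ih =>
    intro n
    simp only [List.cons_append, cumFrom, ih (n + x.length), List.flatten_cons,
      List.length_append]
    rw [Nat.add_assoc]

lemma offs_reverse (secs : List (List Int)) :
    (offs secs).reverse = cumFrom 0 secs.reverse := by
  induction secs with
  | nil => rfl
  | cons s rest ih =>
    simp only [offs, List.reverse_cons, ih, cumFrom_append_single]
    simp

-- B's rebuild fold, characterised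
lemma emitB (out : List Int) (sb : Int) :
    ∀ (ts : List (List Int)) (prev : Nat) (cur acc : List Int),
    out.drop prev = cur ++ ts.flatten →
    (let st := (cumFrom (prev + cur.length) ts).foldl
        (fun (a : List Int × Nat) b => (a.1 ++ (out.take b).drop a.2 ++ [sb], b)) (acc, prev);
     st.1 ++ out.drop st.2) = acc ++ cur ++ ts.flatMap (fun u => sb :: u) := by
  intro ts
  induction ts with
  | nil =>
    intro prev cur acc hdrop
    simp only [cumFrom, List.foldl_nil, List.flatMap_nil, List.append_nil]
    rw [hdrop]; simp
  | cons u us ih =>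
    intro prev cur acc hdrop
    have hcur : (out.take (prev + cur.length)).drop prev = cur := by
      rw [List.drop_take, hdrop]
      simpa using List.take_left (l₂ := u ++ us.flatten)
    have hdrop' : out.drop (prev + cur.length) = u ++ us.flatten := by
      rw [← List.drop_drop, hdrop]
      simpa using List.drop_left (l₂ := u ++ us.flatten)
    simp only [cumFrom, List.foldl_cons]
    rw [hcur]
    have := ih (prev + cur.length) u (acc ++ cur ++ [sb]) hdrop'
    simp only [List.append_assoc] at this ⊢
    rw [this]
    simp

-- B's rebuild over the recorded boundaries equals A's indexed emit of the merged sections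
lemma final_emit (m : List (List Int)) (sb : Int) :
    pB_emit m.reverse.flatten ((offs m).reverse.drop 1) sb = pA_emit (some sb) m.reverse := by
  rw [offs_reverse]
  rcases hm : m.reverse with _ | ⟨t0, ts⟩
  · simp [pB_emit, cumFrom, pA_emit]
  · simp only [cumFrom, List.drop_succ_cons, List.drop_zero]
    rw [emitA_some]
    have := emitB (t0 :: ts).flatten sb ts 0 t0 [] (by simp)
    simp only [Nat.zero_add] at this ⊢
    rw [pB_emit, this]
    simp

-- ===== VERDICT (by name: the statement is the Claim_ definition above) =====
theorem partition_commands_spec : Claim_equal_partition_commands := by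
  intro children sep hdom hpre
  obtain ⟨hall, hok⟩ := hpre
  obtain ⟨hne, hB⟩ := loop_inv children [[]] (by simp) hall (by simpa using hok)
  obtain ⟨s, rest, hsr⟩ : ∃ s rest, children.foldl pA_step [[]] = s :: rest := by
    rcases h : children.foldl pA_step [[]] with _ | ⟨s, rest⟩
    · exact absurd h hne
    · exact ⟨s, rest, rfl⟩
  unfold Spec_partition_commands partition_commands partition_commands_alt
  have h0 : (([] : List Int), ([0] : List Nat))
      = (([([] : List Int)] : List (List Int)).reverse.flatten, offs [[]]) := rfl
  rw [h0, hB, hsr]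
  dsimp only
  rcases rest with _ | ⟨s2, r⟩
  · rcases sep with _ | sb
    · simp [emitA_none, offs]
    · simp [emitA_some, offs]
  · have hlen : (offs (s :: s2 :: r)).length = r.length + 2 := by simp [offs_length]
    rcases sep with _ | sb
    · rw [emitA_none]
      simp [List.append_assoc]
    · rcases r with _ | ⟨r1, r'⟩
      · simp [emitA_some, offs]
      · dsimp only
        have hfe := final_emit ((s2 ++ s) :: r1 :: r') sb
        have ho : offs ((s2 ++ s) :: r1 :: r') = offs (s2 :: r1 :: r') := by simp [offs]
        have hfl : ((s2 ++ s) :: r1 :: r').reverse.flatten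
            = (s :: s2 :: r1 :: r').reverse.flatten := by
          simp [List.append_assoc]
        rw [ho, hfl] at hfe
        have htail : (offs (s :: s2 :: r1 :: r')).tail = offs (s2 :: r1 :: r') := rfl
        rw [if_pos (show (offs (s :: s2 :: r1 :: r')).length > 1 by rw [hlen]; omega),
          htail,
          if_neg (show ¬ (offs (s2 :: r1 :: r')).length ≤ 1 by simp [offs_length])]
        exact hfe.symm
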